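-- pv_equiv track=rewrite | github.com/michaelkimm/Algorithm-problem-solving-thought-process-re-record | Python/Programmers/WordChainGame.py | solution
-- ===== SOURCE A (Python) =====
-- def solution(n, words):
--     answer = []
--     prev_word = words[0]
--     showed_words = set([prev_word])
--     dropout_exist = False
--
--     for i in range(1, len(words)):
--         turn = i % n + 1
--         if words[i] in showed_words or words[i][0] != prev_word[-1]:
--             cycle = i // n + 1
--             answer = [turn, cycle]
--             dropout_exist = True
--             break
--         prev_word = words[i]
--         showed_words.add(words[i])
--
--     if not dropout_exist:
--         answer = [0, 0]
--     return answer
-- ===== SOURCE B (Python) =====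
-- def solution(n, words):
--     L = len(words)
--     # first index whose word was already used
--     seen = set()
--     dup = L
--     for i, w in enumerate(words):
--         if w in seen:
--             dup = i
--             break
--         seen.add(w)
--     # first index before that which breaks the chain (later breaks cannot matter)
--     chain = next((i for i in range(1, dup) if words[i][0] != words[i - 1][-1]), L)
--     fail = min(chain, dup)
--     if fail < L:
--         return [fail % n + 1, fail // n + 1]
--     return [0, 0]
-- ===== Notes on version B (the rewrite author's own statement) =====
-- stated objective: alternative
-- what changed: Instead of one stateful scan checking the combined drop-out condition, B finds the first duplicate index and the first chain-break index before it in two separate scans with sentinel len(words), takes their minimum, and converts that single index to [turn, cycle].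
import Mathlib
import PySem

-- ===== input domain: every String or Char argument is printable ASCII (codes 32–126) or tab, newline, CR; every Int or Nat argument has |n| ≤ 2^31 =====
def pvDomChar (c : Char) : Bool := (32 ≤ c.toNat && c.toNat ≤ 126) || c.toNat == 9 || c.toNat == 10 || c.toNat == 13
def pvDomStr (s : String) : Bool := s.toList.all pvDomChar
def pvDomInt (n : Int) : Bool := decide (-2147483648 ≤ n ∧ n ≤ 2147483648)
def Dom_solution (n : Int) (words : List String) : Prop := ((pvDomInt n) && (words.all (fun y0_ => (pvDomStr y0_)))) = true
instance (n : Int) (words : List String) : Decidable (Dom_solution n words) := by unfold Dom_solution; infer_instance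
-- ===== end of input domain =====

-- B replaces A's single stateful scan by two separate "first failure index" scans —
-- first duplicate, then first chain break below it — combined with min; a different
-- decomposition, same cost.

-- ===== PORT A =====
-- the for-loop of A: state (prev_word, showed_words), early return on drop-out
def solutionLoopA (n : Int) (words : List String) (prev : String)
    (showed : PySem.Set String) (i : Nat) : List Int :=
  if i < words.length then
    -- w = words[i] (i in range, always valid)
    if PySem.Set.contains showed (words.getD i "")
        || decide (PySem.Str.pyGet? (words.getD i "") 0 ≠ PySem.Str.pyGet? prev (-1)) then
      [PySem.Int.mod (i : Int) n + 1, PySem.Int.floordiv (i : Int) n + 1]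
    else solutionLoopA n words (words.getD i "") (PySem.Set.add showed (words.getD i "")) (i + 1)
  else [0, 0]
termination_by words.length - i

def solution (n : Int) (words : List String) : List Int :=
  let prev := words.getD 0 ""                -- words[0]; Pre_ requires words ≠ []
  solutionLoopA n words prev (PySem.Set.ofList [prev]) 1

-- ===== PORT B =====
-- first i in [start, bound) with words[i][0] != words[i-1][-1], else len(words)
def solutionChainB (words : List String) (bound : Nat) (i : Nat) : Nat :=
  if i < bound then
    if PySem.Str.pyGet? (words.getD i "") 0 ≠ PySem.Str.pyGet? (words.getD (i - 1) "") (-1)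
    then i else solutionChainB words bound (i + 1)
  else words.length
termination_by bound - i

-- first i with words[i] already seen, else len(words)
def solutionDupB (words : List String) (seen : PySem.Set String) (i : Nat) : Nat :=
  if i < words.length then
    if PySem.Set.contains seen (words.getD i "") then i
    else solutionDupB words (PySem.Set.add seen (words.getD i "")) (i + 1)
  else words.length
termination_by words.length - i

def solution_alt (n : Int) (words : List String) : List Int :=
  let L := words.length
  let dup := solutionDupB words PySem.Set.empty 0
  let chain := solutionChainB words dup 1
  let fail := min chain dup
  if fail < L then [PySem.Int.mod (fail : Int) n + 1, PySem.Int.floordiv (fail : Int) n + 1]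
  else [0, 0]

-- ===== PRECONDITION & SPEC =====
-- Pre_ excludes exactly the inputs where the Python A raises: words = [] (IndexError on
-- words[0]); n = 0 with at least two words (ZeroDivisionError in i % n, evaluated on every
-- iteration); and inputs whose scan reaches an index i that must index an empty word
-- (words[i] or words[i-1] empty, words[i] not a duplicate, and no drop-out at any j < i):
-- there w[0] / w[-1] raises IndexError.
def Pre_solution (n : Int) (words : List String) : Prop :=
  words ≠ [] ∧ (n ≠ 0 ∨ words.length ≤ 1) ∧
  ∀ i ∈ List.range words.length, 1 ≤ i →
    (words.getD i "" = "" ∨ words.getD (i - 1) "" = "") →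
    words.getD i "" ∉ words.take i →
    ∃ j ∈ List.range i, 1 ≤ j ∧
      (words.getD j "" ∈ words.take j ∨
       PySem.Str.pyGet? (words.getD j "") 0 ≠ PySem.Str.pyGet? (words.getD (j - 1) "") (-1))
instance (n : Int) (words : List String) : Decidable (Pre_solution n words) := by
  unfold Pre_solution; infer_instance
def pvWitness_solution : Int × List String := (2, ["ab", "bc", "cd", "da", "ab"])

def Spec_solution (n : Int) (words : List String) (out : List Int) : Prop := out = solution_alt n words
instance (n : Int) (words : List String) (out : List Int) : Decidable (Spec_solution n words out) := by unfold Spec_solution; infer_instance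

-- ===== CLAIM (what is proved, stated in full; the proofs are below) =====
def Claim_equal_solution : Prop := ∀ (n : Int) (words : List String), Dom_solution n words → Pre_solution n words → Spec_solution n words (solution n words)

-- ===== LEMMAS AND PROOFS =====

-- proof-side: the two failure predicates as pure functions of the index
def pvDupP (words : List String) (i : Nat) : Bool := decide (words.getD i "" ∈ words.take i)
def pvChainP (words : List String) (i : Nat) : Bool :=
  decide (PySem.Str.pyGet? (words.getD i "") 0 ≠ PySem.Str.pyGet? (words.getD (i - 1) "") (-1))

-- first index ≥ i with a duplicate / with either failure, else len
def pvFstDup (words : List String) (i : Nat) : Nat :=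
  if i < words.length then (if pvDupP words i then i else pvFstDup words (i + 1))
  else words.length
termination_by words.length - i

def pvFstBoth (words : List String) (i : Nat) : Nat :=
  if i < words.length then (if pvDupP words i || pvChainP words i then i else pvFstBoth words (i + 1))
  else words.length
termination_by words.length - i

theorem le_pvFstDup (words : List String) (i : Nat) (h : i ≤ words.length) :
    i ≤ pvFstDup words i := by
  rw [pvFstDup]
  split
  · split
    · exact le_refl i
    · exact le_trans (Nat.le_succ i) (le_pvFstDup words (i + 1) (by omega))
  · exact h
termination_by words.length - i

-- the seen/showed set of both scans tracks membership in the first i words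
theorem pvInv_step (words : List String) (s : PySem.Set String) (i : Nat) (hl : i < words.length)
    (hinv : ∀ w, PySem.Set.contains s w = decide (w ∈ words.take i)) (w : String) :
    PySem.Set.contains (PySem.Set.add s (words.getD i "")) w = decide (w ∈ words.take (i + 1)) := by
  have hg : words.getD i "" = words[i] := by simp [List.getD, List.getElem?_eq_getElem hl]
  have ht : words.take (i + 1) = words.take i ++ [words[i]] := by
    rw [List.take_add_one]
    simp [List.getElem?_eq_getElem hl]
  have h2 : w ∈ s ↔ w ∈ words.take i := by
    rw [← PySem.Set.contains_iff, hinv w, decide_eq_true_eq]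
  have h1 : (PySem.Set.contains (PySem.Set.add s (words.getD i "")) w = true)
      ↔ (w ∈ words.take (i + 1)) := by
    rw [PySem.Set.contains_iff, PySem.Set.mem_add, ht, hg, List.mem_append, List.mem_singleton]
    tauto
  by_cases hw : w ∈ words.take (i + 1)
  · exact (h1.mpr hw).trans (decide_eq_true hw).symm
  · exact (Bool.eq_false_iff.mpr fun hx => hw (h1.mp hx)).trans (decide_eq_false hw).symm

theorem solutionDupB_eq (words : List String) (seen : PySem.Set String) (i : Nat)
    (hinv : ∀ w, PySem.Set.contains seen w = decide (w ∈ words.take i)) :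
    solutionDupB words seen i = pvFstDup words i := by
  rw [solutionDupB, pvFstDup]
  by_cases hl : i < words.length
  · rw [if_pos hl, if_pos hl, hinv]
    simp only [pvDupP]
    split
    · rfl
    · exact solutionDupB_eq words _ (i + 1) (pvInv_step words seen i hl hinv)
  · rw [if_neg hl, if_neg hl]
termination_by words.length - i

theorem solutionLoopA_eq (n : Int) (words : List String) (prev : String)
    (showed : PySem.Set String) (i : Nat) (hi : 1 ≤ i)
    (hprev : prev = words.getD (i - 1) "")
    (hinv : ∀ w, PySem.Set.contains showed w = decide (w ∈ words.take i)) :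
    solutionLoopA n words prev showed i =
      (if pvFstBoth words i < words.length then
        [PySem.Int.mod ((pvFstBoth words i : Nat) : Int) n + 1,
         PySem.Int.floordiv ((pvFstBoth words i : Nat) : Int) n + 1]
      else [0, 0]) := by
  rw [solutionLoopA]
  by_cases hl : i < words.length
  · rw [if_pos hl, hinv, hprev]
    by_cases hcond : (decide ((words.getD i "") ∈ words.take i)
        || decide (PySem.Str.pyGet? (words.getD i "") 0
             ≠ PySem.Str.pyGet? (words.getD (i - 1) "") (-1))) = true
    · have hb : pvFstBoth words i = i := by
        rw [pvFstBoth, if_pos hl]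
        simp only [pvDupP, pvChainP]
        rw [if_pos hcond]
      rw [if_pos hcond, hb, if_pos hl]
    · have hb : pvFstBoth words i = pvFstBoth words (i + 1) := by
        rw [pvFstBoth, if_pos hl]
        simp only [pvDupP, pvChainP]
        rw [if_neg hcond]
      rw [if_neg hcond, hb]
      exact solutionLoopA_eq n words _ _ (i + 1) (by omega) (by simp)
        (pvInv_step words showed i hl hinv)
  · rw [if_neg hl]
    have hb : pvFstBoth words i = words.length := by rw [pvFstBoth, if_neg hl]
    rw [hb, if_neg (lt_irrefl _)]
termination_by words.length - i

-- the first combined failure is the minimum of the two separate first failures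
theorem pvFstDup_le (words : List String) (i : Nat) (h : i ≤ words.length) :
    pvFstDup words i ≤ words.length := by
  rw [pvFstDup]
  split
  · split
    · omega
    · exact pvFstDup_le words (i + 1) (by omega)
  · exact le_refl _
termination_by words.length - i

-- the first combined failure is the minimum of the first duplicate and the first
-- chain break found below it
theorem pvFstBoth_min (words : List String) (i : Nat) (hi : i ≤ words.length) :
    pvFstBoth words i = min (solutionChainB words (pvFstDup words i) i) (pvFstDup words i) := by
  rw [pvFstBoth, solutionChainB]
  by_cases hl : i < words.length
  · rw [if_pos hl]
    by_cases hd : pvDupP words i = true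
    · have hdup : pvFstDup words i = i := by rw [pvFstDup, if_pos hl, if_pos hd]
      rw [hdup, if_neg (lt_irrefl i), if_pos (by rw [hd]; simp)]
      have := pvFstDup_le words i hi
      omega
    · have hdup : pvFstDup words i = pvFstDup words (i + 1) := by
        rw [pvFstDup, if_pos hl, if_neg hd]
      have hgt : i < pvFstDup words i := by
        rw [hdup]
        exact lt_of_lt_of_le (Nat.lt_succ_self i) (le_pvFstDup words (i + 1) (by omega))
      rw [if_pos hgt]
      by_cases hc : (PySem.Str.pyGet? (words.getD i "") 0
          ≠ PySem.Str.pyGet? (words.getD (i - 1) "") (-1))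
      · have hcP : pvChainP words i = true := by rw [pvChainP]; exact decide_eq_true hc
        have hdP : pvDupP words i = false := by simpa using hd
        rw [if_pos (by rw [hdP, hcP]; simp), if_pos hc]
        omega
      · have hcP : pvChainP words i = false := by rw [pvChainP]; exact decide_eq_false hc
        have hdP : pvDupP words i = false := by simpa using hd
        rw [if_neg (by rw [hdP, hcP]; simp), if_neg hc, hdup]
        exact pvFstBoth_min words (i + 1) (by omega)
  · have hdup : pvFstDup words i = words.length := by rw [pvFstDup, if_neg hl]
    rw [if_neg hl, hdup, if_neg hl, Nat.min_self]
termination_by words.length - i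

-- ===== VERDICT (by name: the statement is the Claim_ definition above) =====
theorem solution_spec : Claim_equal_solution := by
  intro n words _ hpre
  obtain ⟨hne, -, -⟩ := hpre
  obtain ⟨x, t, rfl⟩ : ∃ x t, words = x :: t := by
    cases words with
    | nil => exact absurd rfl hne
    | cons x t => exact ⟨x, t, rfl⟩
  unfold Spec_solution solution solution_alt
  rw [solutionLoopA_eq n (x :: t) _ _ 1 (le_refl 1) (by simp [List.getD])
    (by intro w
        simp [PySem.Set.contains_eq_listContains, PySem.Set.ofList, List.getD,
          PySem.Set.add, eq_comm])]
  have hdup : solutionDupB (x :: t) PySem.Set.empty 0 = pvFstDup (x :: t) 1 := by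
    rw [solutionDupB, if_pos (by simp : 0 < (x :: t).length)]
    have h0 : PySem.Set.contains PySem.Set.empty ((x :: t).getD 0 "") = false := rfl
    rw [h0, if_neg Bool.false_ne_true]
    apply solutionDupB_eq
    intro w
    simp [PySem.Set.contains_eq_listContains, PySem.Set.empty, PySem.Set.add, List.getD, eq_comm]
  rw [hdup, pvFstBoth_min (x :: t) 1 (by simp)]
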